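-- pv_equiv track=rewrite | github.com/tuts-22/Sentiment-Analysis-of-Twitter | final.py | remove_tag
-- ===== SOURCE A (Python) =====
-- def remove_tag(sent):
-- 	new_sent="";
-- 	check="";
-- 	i=0;
-- 	while (i < len(sent)):
-- 		if (sent[i] =='@'):
-- 			while (i<len(sent)-1 and ((sent[i+1]>='a' and sent[i+1]<='z') or (sent[i+1]>='A' and sent[i+1]<='Z') or(sent[i+1]>='0' and sent[i+1]<='9') or sent[i+1]=='_')):
-- 				i = i+1;
-- 		else:
-- 			new_sent = new_sent+sent[i];
-- 		i=i+1;
-- 	return new_sent;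
-- ===== SOURCE B (Python) =====
-- _WORD = "abcdefghijklmnopqrstuvwxyzABCDEFGHIJKLMNOPQRSTUVWXYZ0123456789_"
--
-- def remove_tag(sent):
--     head, *rest = sent.split('@')
--     return head + "".join(p.lstrip(_WORD) for p in rest)
-- ===== Notes on version B (the rewrite author's own statement) =====
-- stated objective: idiomatic
-- what changed: Replaced the index-based two-level while loop with char-by-char string concatenation by a single split on the mention marker plus lstrip of word characters on each fragment, joined once.
import Mathlib
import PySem

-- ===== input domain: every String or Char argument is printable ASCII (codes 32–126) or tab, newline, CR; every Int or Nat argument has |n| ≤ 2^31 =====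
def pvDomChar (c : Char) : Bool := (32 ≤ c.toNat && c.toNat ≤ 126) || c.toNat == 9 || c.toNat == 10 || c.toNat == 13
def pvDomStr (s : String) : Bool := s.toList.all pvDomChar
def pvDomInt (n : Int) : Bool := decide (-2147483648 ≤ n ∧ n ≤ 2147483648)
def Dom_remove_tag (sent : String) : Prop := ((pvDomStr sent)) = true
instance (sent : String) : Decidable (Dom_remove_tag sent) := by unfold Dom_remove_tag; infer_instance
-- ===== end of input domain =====

-- B replaces A's index-based two-level while loop by one split plus lstrip of word
-- characters on each fragment (idiomatic; avoids A's quadratic string concatenation).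


-- ===== PORT A =====
-- inner while loop: advances i while sent[i+1] is a word character (the condition
-- is A's literal chain of comparisons)
def removeTagInner (s : List Char) (i : Nat) : Nat :=
  if i < s.length - 1 ∧
      (let c := s.getD (i+1) ' '
       (('a' ≤ c && c ≤ 'z') || ('A' ≤ c && c ≤ 'Z') || ('0' ≤ c && c ≤ '9') || (c == '_')) = true) then
    removeTagInner s (i+1)
  else i
termination_by s.length - 1 - i
decreasing_by omega

-- termination helper for the outer loop (the inner loop never moves i backwards)
theorem inner_ge (s : List Char) (i : Nat) : i ≤ removeTagInner s i := by
  fun_induction removeTagInner s i with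
  | case1 i h ih => omega
  | case2 i h => exact Nat.le_refl i

-- outer while loop over the index i, accumulating new_sent
def removeTagLoop (s : List Char) (i : Nat) (newSent : List Char) : List Char :=
  if _h : i < s.length then
    if s.getD i ' ' = '@' then
      removeTagLoop s (removeTagInner s i + 1) newSent
    else
      removeTagLoop s (i+1) (newSent ++ [s.getD i ' '])
  else newSent
termination_by s.length - i
decreasing_by
  · have := inner_ge s i; omega
  · omega

def remove_tag (sent : String) : String :=
  String.mk (removeTagLoop sent.toList 0 [])

-- ===== PORT B =====
def wordChars : List Char := "abcdefghijklmnopqrstuvwxyzABCDEFGHIJKLMNOPQRSTUVWXYZ0123456789_".toList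

def remove_tag_alt (sent : String) : String :=
  match PySem.Chars.splitOn sent.toList ['@'] with
  | [] => ""   -- unreachable: splitOn never returns an empty list
  | head :: rest =>
    -- p.lstrip(_WORD) ported by hand as dropWhile membership (exact: lstrip(chars)
    -- removes the maximal leading run of characters contained in chars)
    String.mk (head ++ PySem.Chars.join [] (rest.map (fun p => p.dropWhile (fun c => decide (c ∈ wordChars)))))

-- ===== PRECONDITION & SPEC =====
def Spec_remove_tag (sent : String) (out : String) : Prop := out = remove_tag_alt sent
instance (sent : String) (out : String) : Decidable (Spec_remove_tag sent out) := by unfold Spec_remove_tag; infer_instance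

-- ===== CLAIM (what is proved, stated in full; the proofs are below) =====
def Claim_equal_remove_tag : Prop := ∀ (sent : String), Dom_remove_tag sent → Spec_remove_tag sent (remove_tag sent)

-- ===== LEMMAS AND PROOFS =====

def isWord (c : Char) : Bool :=
  ('a' ≤ c && c ≤ 'z') || ('A' ≤ c && c ≤ 'Z') || ('0' ≤ c && c ≤ '9') || (c == '_')

theorem mem_wordChars_eq (c : Char) : decide (c ∈ wordChars) = isWord c := by
  have h : wordChars = ['a','b','c','d','e','f','g','h','i','j','k','l','m','n','o','p','q','r','s','t','u','v','w','x','y','z','A','B','C','D','E','F','G','H','I','J','K','L','M','N','O','P','Q','R','S','T','U','V','W','X','Y','Z','0','1','2','3','4','5','6','7','8','9','_'] := by decide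
  rw [h]
  cases hb : isWord c with
  | true =>
    simp [isWord, Char.le_def, UInt32.le_iff_toNat_le, Char.ext_iff, UInt32.ext_iff] at hb
    simp [Char.ext_iff, UInt32.ext_iff]
    omega
  | false =>
    simp [isWord, Char.le_def, UInt32.le_iff_toNat_le, Char.ext_iff, UInt32.ext_iff, not_le] at hb
    simp [Char.ext_iff, UInt32.ext_iff]
    omega

-- clean one-list recursion computing A's loop on the suffix still to scan
def gRem : List Char → List Char
  | [] => []
  | c :: r => if c = '@' then gRem (r.dropWhile isWord) else c :: gRem r
termination_by l => l.length
decreasing_by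
  · have := List.length_dropWhile_le (p := isWord) (l := r); simp; omega
  · simp

theorem inner_drop (s : List Char) (i : Nat) :
    s.drop (removeTagInner s i + 1) = (s.drop (i+1)).dropWhile isWord := by
  fun_induction removeTagInner s i with
  | case1 i h ih =>
    obtain ⟨hlt, hw⟩ := h
    rw [ih]
    have h1 : i + 1 < s.length := by omega
    rw [List.drop_eq_getElem_cons h1, List.dropWhile_cons]
    have he : s[i+1] = s.getD (i+1) ' ' := by simp [List.getD, List.getElem?_eq_getElem h1]
    rw [he]
    simp only [isWord]
    rw [if_pos hw]
  | case2 i h =>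
    rcases Nat.lt_or_ge i (s.length - 1) with hlt | hge
    · simp only [not_and] at h
      have hw := h hlt
      have h1 : i + 1 < s.length := by omega
      rw [List.drop_eq_getElem_cons h1, List.dropWhile_cons]
      have he : s[i+1] = s.getD (i+1) ' ' := by simp [List.getD, List.getElem?_eq_getElem h1]
      rw [he]
      simp only [isWord]
      simp only [] at hw
      rw [if_neg hw]
    · have : s.length ≤ i + 1 := by omega
      rw [List.drop_eq_nil_of_le this]
      simp

theorem loop_eq (s : List Char) (i : Nat) (acc : List Char) :
    removeTagLoop s i acc = acc ++ gRem (s.drop i) := by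
  fun_induction removeTagLoop s i acc with
  | case1 i acc h hat ih =>
    rw [ih, inner_drop]
    rw [List.drop_eq_getElem_cons h]
    have he : s[i] = s.getD i ' ' := by simp [List.getD, List.getElem?_eq_getElem h]
    rw [he, gRem, if_pos hat]
  | case2 i acc h hat ih =>
    rw [ih, List.drop_eq_getElem_cons h]
    have he : s[i] = s.getD i ' ' := by simp [List.getD, List.getElem?_eq_getElem h]
    rw [he, gRem, if_neg hat]
    simp
  | case3 i acc h =>
    rw [List.drop_eq_nil_of_le (by omega)]
    simp [gRem]

-- clean structural recursion computing splitOn · ['@']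
def spAt : List Char → List (List Char)
  | [] => [[]]
  | c :: r => if c = '@' then [] :: spAt r else (c :: (spAt r).headD []) :: (spAt r).tail

theorem spAt_ne_nil (l : List Char) : spAt l ≠ [] := by
  cases l with
  | nil => simp [spAt]
  | cons c r => simp only [spAt]; split <;> simp

theorem go_eq (fuel : Nat) (l cur : List Char) (acc : List (List Char)) (hf : l.length ≤ fuel) :
    PySem.Chars.splitOn.go ['@'] fuel l cur acc =
      acc.reverse ++ (cur.reverse ++ (spAt l).headD []) :: (spAt l).tail := by
  induction fuel generalizing l cur acc with
  | zero =>
    have : l = [] := List.length_eq_zero_iff.mp (Nat.le_zero.mp hf)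
    subst this
    simp [PySem.Chars.splitOn.go, spAt]
  | succ fuel ih =>
    cases l with
    | nil => simp [PySem.Chars.splitOn.go, spAt]
    | cons c rest =>
      rw [PySem.Chars.splitOn.go]
      by_cases hc : c = '@'
      · subst hc
        have hp : List.isPrefixOf ['@'] ('@' :: rest) = true := by simp [List.isPrefixOf]
        rw [if_pos hp]
        simp only [List.length_cons] at hf
        rw [ih _ _ _ (by simp; omega)]
        have := spAt_ne_nil rest
        simp only [spAt]
        cases hs : spAt rest with
        | nil => exact absurd hs this
        | cons h t => simp [hs]
      · have hp : List.isPrefixOf ['@'] (c :: rest) = false := by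
          simp [List.isPrefixOf]; exact fun h => absurd h.symm hc
        rw [if_neg (by simp [hp])]
        simp only [List.length_cons] at hf
        rw [ih _ _ _ (by omega)]
        simp only [spAt, if_neg hc]
        simp

theorem splitOn_eq_spAt (l : List Char) : PySem.Chars.splitOn l ['@'] = spAt l := by
  have h := go_eq (l.length + 1) l [] [] (by omega)
  rw [PySem.Chars.splitOn, h]
  have := spAt_ne_nil l
  cases hs : spAt l with
  | nil => exact absurd hs this
  | cons hd t => simp

theorem spAt_dropWhile (r : List Char) :
    spAt (r.dropWhile isWord) = ((spAt r).headD []).dropWhile isWord :: (spAt r).tail := by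
  induction r with
  | nil => simp [spAt]
  | cons c r ih =>
    rw [List.dropWhile_cons]
    by_cases hw : isWord c = true
    · rw [if_pos hw]
      rw [ih]
      have hc : ¬ c = '@' := by
        intro h; subst h; simp [isWord] at hw
      simp only [spAt, if_neg hc]
      rw [List.headD_cons, List.tail_cons, List.dropWhile_cons, if_pos hw]
    · rw [if_neg hw]
      by_cases hc : c = '@'
      · subst hc
        simp only [spAt]
        simp
      · simp only [spAt, if_neg hc]
        rw [List.headD_cons, List.tail_cons, List.dropWhile_cons, if_neg hw]

theorem join_nil_flatten (ps : List (List Char)) : PySem.Chars.join [] ps = ps.flatten := by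
  rw [PySem.Chars.join]
  induction ps with
  | nil => rfl
  | cons p ps ih =>
    cases ps with
    | nil => simp [List.intercalate]
    | cons q qs =>
      have hstep : List.intercalate ([]:List Char) (p::q::qs) = p ++ List.intercalate [] (q::qs) := by
        simp [List.intercalate, List.intersperse]
      rw [hstep, ih]
      simp

theorem gRem_eq_alt (l : List Char) :
    gRem l = (spAt l).headD [] ++
      PySem.Chars.join [] ((spAt l).tail.map (fun p => p.dropWhile (fun c => decide (c ∈ wordChars)))) := by
  have hdw : ∀ p : List Char, p.dropWhile (fun c => decide (c ∈ wordChars)) = p.dropWhile isWord := by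
    intro p; congr 1; funext c; exact mem_wordChars_eq c
  fun_induction gRem l with
  | case1 => simp [spAt]
  | case2 r ih =>
    rw [ih, spAt_dropWhile]
    simp only [spAt, List.headD_cons, List.tail_cons]
    have := spAt_ne_nil r
    cases hs : spAt r with
    | nil => exact absurd hs this
    | cons h t =>
      simp [join_nil_flatten, hdw]
  | case3 c r hc ih =>
    rw [ih]
    simp only [spAt, if_neg hc, List.headD_cons, List.tail_cons, List.cons_append]

-- ===== VERDICT (by name: the statement is the Claim_ definition above) =====
theorem remove_tag_spec : Claim_equal_remove_tag := by
  intro sent _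
  unfold Spec_remove_tag remove_tag remove_tag_alt
  rw [loop_eq, splitOn_eq_spAt]
  have h := spAt_ne_nil sent.toList
  cases hs : spAt sent.toList with
  | nil => exact absurd hs h
  | cons hd tl =>
    simp only [List.drop_zero, gRem_eq_alt, hs, List.headD_cons, List.tail_cons, List.nil_append]
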